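-- pv_equiv track=rewrite | github.com/d1o1m133/bookbot | stats.py | lower_letter_count
-- ===== SOURCE A (Python) =====
-- def lower_letter_count(text):
--     letter_dict = {}
--     for l in text.lower():
--         if l.strip() == "":  # Ignore spaces and empty lines entirely
--             continue
--         if l not in letter_dict:
--             letter_dict[l] = 0
--         letter_dict[l] += 1
--     return letter_dict
-- ===== SOURCE B (Python) =====
-- def lower_letter_count(text):
--     kept = [c for c in text.lower() if c.strip()]
--     return {c: kept.count(c) for c in dict.fromkeys(kept)}
-- ===== Notes on version B (the rewrite author's own statement) =====
-- stated objective: simpler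
-- what changed: B replaces A's per-character dict accumulation with a two-phase grouping: filter the lowered characters once, dedup them in first-occurrence order with dict.fromkeys, and build each count with list.count in a dict comprehension.
import Mathlib
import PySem

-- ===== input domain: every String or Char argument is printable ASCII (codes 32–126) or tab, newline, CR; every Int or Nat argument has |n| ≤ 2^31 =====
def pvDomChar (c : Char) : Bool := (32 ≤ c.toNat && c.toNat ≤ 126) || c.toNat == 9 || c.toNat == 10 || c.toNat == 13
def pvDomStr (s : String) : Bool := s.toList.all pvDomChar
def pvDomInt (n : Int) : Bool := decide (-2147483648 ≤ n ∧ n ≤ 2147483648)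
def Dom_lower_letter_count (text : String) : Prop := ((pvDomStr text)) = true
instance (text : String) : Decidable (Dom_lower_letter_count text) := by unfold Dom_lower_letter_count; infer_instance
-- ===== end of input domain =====

-- B counts by filter + ordered dedup + list.count instead of A's per-character dict accumulation; objective: simpler.

-- ===== PORT A =====
-- iterating a Python str yields one-character strings: we map each char to String.mk [c]
def lower_letter_count (text : String) : List (String × Int) :=
  (((PySem.Str.lower text).toList.map (fun c => String.mk [c])).foldl
    (fun d l =>
      if PySem.Str.strip l = "" then d            -- continue: ignore whitespace
      else
        let d1 := if d.contains l then d else d.insert l 0   -- if l not in letter_dict: letter_dict[l] = 0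
        d1.insert l (d1.getD l 0 + 1))                       -- letter_dict[l] += 1
    PySem.Dict.empty).items

-- ===== PORT B =====
def lower_letter_count_alt (text : String) : List (String × Int) :=
  let kept := ((PySem.Str.lower text).toList.map (fun c => String.mk [c])).filter
                (fun c => !(PySem.Str.strip c = ""))         -- [c for c in text.lower() if c.strip()]
  ((PySem.List.dedup kept).foldl                             -- {c: kept.count(c) for c in dict.fromkeys(kept)}
    (fun d c => d.insert c ((kept.count c : Int)))
    PySem.Dict.empty).items

-- ===== PRECONDITION & SPEC =====
def Spec_lower_letter_count (text : String) (out : List (String × Int)) : Prop := out = lower_letter_count_alt text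
instance (text : String) (out : List (String × Int)) : Decidable (Spec_lower_letter_count text out) := by unfold Spec_lower_letter_count; infer_instance

-- ===== CLAIM (what is proved, stated in full; the proofs are below) =====
def Claim_equal_lower_letter_count : Prop := ∀ (text : String), Dom_lower_letter_count text → Spec_lower_letter_count text (lower_letter_count text)

-- ===== LEMMAS AND PROOFS =====

-- A's insert-0-then-increment step is a plain counter increment
lemma stepA_eq :
    (fun (d : PySem.Dict String Int) (l : String) =>
      if PySem.Str.strip l = "" then d
      else
        let d1 := if d.contains l then d else d.insert l 0
        d1.insert l (d1.getD l 0 + 1))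
    = (fun d l =>
      if (!(PySem.Str.strip l = "" : Bool) : Bool) = true then d.insert l (d.getD l 0 + 1) else d) := by
  funext d l
  by_cases hs : PySem.Str.strip l = ""
  · simp [hs]
  · by_cases hc : d.contains l
    · simp [hc]
    · simp only [hc, if_neg, Bool.false_eq_true, not_false_iff]
      rw [PySem.Dict.getD_insert_self, PySem.Dict.insert_insert_self,
          PySem.Dict.getD_of_not_contains d 0 (by simpa using hc)]
      simp

-- Counter(kept).items equals B's grouped build: ordered dedup paired with list counts
lemma group_eq (kept : List String) :
    (kept.foldl (fun d l => d.insert l (d.getD l 0 + 1)) PySem.Dict.empty).items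
      = ((PySem.List.dedup kept).foldl
          (fun d c => d.insert c ((kept.count c : Int))) PySem.Dict.empty).items := by
  rw [PySem.Dict.foldl_insert_getD_add_one_eq_counter, PySem.Dict.items_counter,
      PySem.Dict.items_foldl_insert_fresh (PySem.List.dedup kept) (fun c => c)
        (fun c => ((kept.count c : Int))) PySem.Dict.empty
        (fun a _ => PySem.Dict.contains_empty a)
        (by simpa using PySem.List.nodup_dedup kept)]
  simp [PySem.List.dedup_eq_ofList, PySem.Dict.empty]

-- ===== VERDICT (by name: the statement is the Claim_ definition above) =====
theorem lower_letter_count_spec : Claim_equal_lower_letter_count := by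
  intro text _
  unfold Spec_lower_letter_count lower_letter_count lower_letter_count_alt
  rw [stepA_eq, ← List.foldl_filter]
  exact group_eq _
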